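-- pv_equiv track=rewrite | github.com/SahasilAK/interview_code_answers | answer_2.py | base10_valueGenerator
-- ===== SOURCE A (Python) =====
-- def base10_valueGenerator(input_string,ls):
-- 	if len(input_string)%2==0:
-- 		split1=input_string[:len(input_string)//2]
-- 		split2=input_string[len(input_string)//2:]
-- 		split1.upper()
-- 		split2.upper()
-- 		val=[]
-- 		val1=[]
-- 		for i in split1:
-- 			val.append(list[i])
--
--
-- 		for i in split2:
-- 			val1.append(list[i])
--
-- 		the_base10_split1=0
-- 		the_base10_split2=0
-- 		for i in range(0,len(val)):
-- 			the_base10_split1+=val[i]*26**(len(val)-i-1)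
--
-- 		for i in range(0,len(val1)):
-- 			the_base10_split2+=val1[i]*26**(len(val1)-i-1)
-- 		total_base10=the_base10_split1+the_base10_split2
-- 		return total_base10
-- 	else:
-- 		return 0
--
-- list={'A':0,'B':1,'C':2,'D':3,'E':4,'F':5,'G':6,'H':7,'I':8,'J':9,'K':10,'L':11,'M':12,'N':13,'O':14,'P':15,'Q':16,'R':17,'S':18,'T':19,'U':20,'v':21,'W':22,'X':23,'Y':24,'Z':25}
-- ===== SOURCE B (Python) =====
-- list={'A':0,'B':1,'C':2,'D':3,'E':4,'F':5,'G':6,'H':7,'I':8,'J':9,'K':10,'L':11,'M':12,'N':13,'O':14,'P':15,'Q':16,'R':17,'S':18,'T':19,'U':20,'v':21,'W':22,'X':23,'Y':24,'Z':25}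
--
-- def base10_valueGenerator(input_string, ls):
-- 	n = len(input_string)
-- 	if n % 2:
-- 		return 0
-- 	h = n // 2
-- 	acc1 = 0
-- 	acc2 = 0
-- 	for i, ch in enumerate(input_string):
-- 		v = list[ch]
-- 		if i < h:
-- 			acc1 = acc1 * 26 + v
-- 		else:
-- 			acc2 = acc2 * 26 + v
-- 	return acc1 + acc2
-- ===== Notes on version B (the rewrite author's own statement) =====
-- stated objective: simpler
-- what changed: Replaces A's slicing into two halves, two digit-value lists and two index loops summing val[i]*26**(len-i-1) with a fresh power per term, by a single enumerate pass over the whole string keeping two Horner accumulators (acc = acc*26 + list[ch]) switched at the midpoint; no slices, no intermediate lists, no exponentiation.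
import Mathlib
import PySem

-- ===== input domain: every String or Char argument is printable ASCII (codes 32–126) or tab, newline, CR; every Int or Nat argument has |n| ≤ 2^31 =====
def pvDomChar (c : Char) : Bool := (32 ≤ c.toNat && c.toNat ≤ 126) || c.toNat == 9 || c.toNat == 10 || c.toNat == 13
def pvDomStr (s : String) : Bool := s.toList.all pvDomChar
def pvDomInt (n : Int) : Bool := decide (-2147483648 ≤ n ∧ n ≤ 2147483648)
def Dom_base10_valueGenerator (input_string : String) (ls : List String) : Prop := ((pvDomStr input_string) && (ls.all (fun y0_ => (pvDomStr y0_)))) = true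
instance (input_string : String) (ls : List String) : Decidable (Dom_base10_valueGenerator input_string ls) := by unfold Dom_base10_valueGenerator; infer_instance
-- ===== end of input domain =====

-- B replaces A's two half-slices, digit-value lists and per-term 26**k powers by one enumerate
-- pass with two Horner accumulators switched at the midpoint (simpler; same KeyError behaviour,
-- excluded by Pre_).

-- ===== PORT A =====
-- the module-level dict literally named `list` (note the 'v'/'V' asymmetry), shared by A and B
def pvList : PySem.Dict Char Int := PySem.Dict.ofList
  [('A',0),('B',1),('C',2),('D',3),('E',4),('F',5),('G',6),('H',7),('I',8),('J',9),
   ('K',10),('L',11),('M',12),('N',13),('O',14),('P',15),('Q',16),('R',17),('S',18),('T',19),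
   ('U',20),('v',21),('W',22),('X',23),('Y',24),('Z',25)]

-- `list[i]` raises KeyError on a missing key: Pre_ excludes those inputs, getD 0 is exact on Pre_
def base10_valueGenerator (input_string : String) (ls : List String) : Int :=
  let cs := input_string.toList
  if (cs.length : Int) % 2 == 0 then
    let split1 := PySem.List.slice cs none (some (PySem.Int.floordiv (cs.length : Int) 2))
    let split2 := PySem.List.slice cs (some (PySem.Int.floordiv (cs.length : Int) 2)) none
    -- split1.upper() / split2.upper(): results discarded, no effect
    let val := split1.foldl (fun acc c => acc ++ [pvList.getD c 0]) []
    let val1 := split2.foldl (fun acc c => acc ++ [pvList.getD c 0]) []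
    let the_base10_split1 :=
      (PySem.List.pyRange 0 (val.length : Int) 1).foldl
        (fun s i => s + PySem.List.pyGetD val i 0 * 26 ^ (((val.length : Int) - i - 1).toNat)) 0
    let the_base10_split2 :=
      (PySem.List.pyRange 0 (val1.length : Int) 1).foldl
        (fun s i => s + PySem.List.pyGetD val1 i 0 * 26 ^ (((val1.length : Int) - i - 1).toNat)) 0
    the_base10_split1 + the_base10_split2
  else 0

-- ===== PORT B =====
-- the enumerate loop of Source B: one structural recursion over the characters, carrying the
-- running index i, the midpoint h and the two accumulators
def pvScan : List Char → Nat → Nat → Int → Int → Int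
  | [], _, _, acc1, acc2 => acc1 + acc2
  | ch :: rest, i, h, acc1, acc2 =>
      let v := pvList.getD ch 0
      if i < h then pvScan rest (i + 1) h (acc1 * 26 + v) acc2
      else pvScan rest (i + 1) h acc1 (acc2 * 26 + v)

def base10_valueGenerator_alt (input_string : String) (ls : List String) : Int :=
  let n := input_string.toList.length
  if n % 2 ≠ 0 then 0
  else pvScan input_string.toList 0 (n / 2) 0 0

-- ===== PRECONDITION & SPEC =====
def pvKeyChars : List Char := ['A','B','C','D','E','F','G','H','I','J','K','L','M','N','O','P','Q','R','S','T','U','v','W','X','Y','Z']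

-- Pre_ excludes exactly the inputs where A raises KeyError: even-length strings with a character outside the dict's keys.
def Pre_base10_valueGenerator (input_string : String) (ls : List String) : Prop :=
  input_string.toList.length % 2 = 1 ∨ input_string.toList.all (fun c => pvKeyChars.contains c) = true

instance (input_string : String) (ls : List String) : Decidable (Pre_base10_valueGenerator input_string ls) := by
  unfold Pre_base10_valueGenerator; infer_instance

def pvWitness_base10_valueGenerator : String × List String := ("ABBA", ["x"])

def Spec_base10_valueGenerator (input_string : String) (ls : List String) (out : Int) : Prop := out = base10_valueGenerator_alt input_string ls
instance (input_string : String) (ls : List String) (out : Int) : Decidable (Spec_base10_valueGenerator input_string ls out) := by unfold Spec_base10_valueGenerator; infer_instance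

-- ===== CLAIM (what is proved, stated in full; the proofs are below) =====
def Claim_equal_base10_valueGenerator : Prop := ∀ (input_string : String) (ls : List String), Dom_base10_valueGenerator input_string ls → Pre_base10_valueGenerator input_string ls → Spec_base10_valueGenerator input_string ls (base10_valueGenerator input_string ls)

-- ===== LEMMAS AND PROOFS =====

-- A's indexed power sum over a list of digit values equals a left-to-right Horner fold.
theorem pv_powsum_eq_horner (vs : List Int) :
    (PySem.List.pyRange 0 (vs.length : Int) 1).foldl
      (fun s i => s + PySem.List.pyGetD vs i 0 * 26 ^ (((vs.length : Int) - i - 1).toNat)) 0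
    = vs.foldl (fun a x => a * 26 + x) 0 := by
  induction vs using List.reverseRecOn with
  | nil => simp [PySem.List.pyRange]
  | append_singleton xs x ih =>
    have hlen : ((xs ++ [x]).length : Int) = (xs.length : Int) + 1 := by
      simp
    rw [hlen, PySem.List.pyRange_one_succ_right (by positivity), List.foldl_append]
    have hstep :
        (PySem.List.pyRange 0 (xs.length : Int) 1).foldl
          (fun s i => s + PySem.List.pyGetD (xs ++ [x]) i 0 * 26 ^ ((((xs.length : Int) + 1) - i - 1).toNat)) 0
        = 26 * ((PySem.List.pyRange 0 (xs.length : Int) 1).foldl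
            (fun s i => s + PySem.List.pyGetD xs i 0 * 26 ^ (((xs.length : Int) - i - 1).toNat)) 0) := by
      rw [PySem.List.foldl_add, PySem.List.foldl_add, zero_add, zero_add]
      have hmap : (PySem.List.pyRange 0 (xs.length : Int) 1).map
            (fun i => PySem.List.pyGetD (xs ++ [x]) i 0 * 26 ^ ((((xs.length : Int) + 1) - i - 1).toNat))
          = (PySem.List.pyRange 0 (xs.length : Int) 1).map
            (fun i => 26 * (PySem.List.pyGetD xs i 0 * 26 ^ (((xs.length : Int) - i - 1).toNat))) := by
        apply List.map_congr_left
        intro i hi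
        rw [PySem.List.mem_pyRange_one] at hi
        have hi0 : 0 ≤ i := hi.1
        have hilt : i < (xs.length : Int) := hi.2
        have hget : PySem.List.pyGetD (xs ++ [x]) i 0 = PySem.List.pyGetD xs i 0 := by
          rw [PySem.List.pyGetD_eq_getElem (xs ++ [x]) 0 hi0 (by omega),
              PySem.List.pyGetD_eq_getElem xs 0 hi0 (by exact_mod_cast hilt)]
          exact List.getElem_append_left (by omega)
        rw [hget]
        have hexp : ((((xs.length : Int) + 1) - i - 1).toNat) = (((xs.length : Int) - i - 1).toNat) + 1 := by
          omega
        rw [hexp, pow_succ]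
        ring
      rw [hmap, List.sum_map_mul_left]
    rw [hstep, ih]
    have hx : PySem.List.pyGetD (xs ++ [x]) (xs.length : Int) 0 = x := by
      rw [PySem.List.pyGetD_natCast, List.getD_append_right xs [x] 0 xs.length (le_refl _)]
      rw [Nat.sub_self]
      rfl
    rw [List.foldl_append]
    simp only [List.foldl_cons, List.foldl_nil, hx]
    have hexp0 : ((((xs.length : Int) + 1) - (xs.length : Int) - 1).toNat) = 0 := by omega
    rw [hexp0]
    ring

-- B's single scan splits, at the midpoint, into one Horner fold per half.
theorem pvScan_eq (l : List Char) (i h : Nat) (a1 a2 : Int) :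
    pvScan l i h a1 a2
      = (l.take (h - i)).foldl (fun a ch => a * 26 + pvList.getD ch 0) a1
        + (l.drop (h - i)).foldl (fun a ch => a * 26 + pvList.getD ch 0) a2 := by
  induction l generalizing i a1 a2 with
  | nil => simp [pvScan]
  | cons c rest ih =>
    by_cases hlt : i < h
    · have hsub : h - i = (h - (i + 1)) + 1 := by omega
      simp only [pvScan, hlt, if_true, hsub, List.take_succ_cons, List.drop_succ_cons,
        List.foldl_cons]
      exact ih (i + 1) _ a2
    · have hz : h - i = 0 := by omega
      have hz' : h - (i + 1) = 0 := by omega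
      rw [hz, List.take_zero, List.drop_zero, List.foldl_nil]
      simp only [pvScan, hlt, if_false]
      rw [ih (i + 1), hz', List.take_zero, List.drop_zero, List.foldl_nil, List.foldl_cons]

-- on Pre_, every getD in the even branch hits the dict, so both ports see the same digit values;
-- the equivalence reduces A's machinery to two Horner folds, which pvScan_eq identifies with B's scan.
theorem base10_valueGenerator_spec : Claim_equal_base10_valueGenerator := by
  intro s ls _hdom _hpre
  unfold Spec_base10_valueGenerator base10_valueGenerator base10_valueGenerator_alt
  set cs := s.toList with hcs
  by_cases hpar : (cs.length : Int) % 2 == 0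
  · have hpar' : ¬ cs.length % 2 ≠ 0 := by
      simp only [beq_iff_eq] at hpar
      omega
    simp only [hpar, hpar', if_true, if_false]
    have hfd : PySem.Int.floordiv (cs.length : Int) 2 = ((cs.length / 2 : Nat) : Int) := by
      rw [PySem.Int.floordiv_eq_ediv_of_pos (by norm_num)]
      exact (Int.natCast_div cs.length 2).symm
    rw [hfd, PySem.List.slice_to_natCast, PySem.List.slice_from_natCast,
        PySem.List.foldl_append_singleton_eq_map, PySem.List.foldl_append_singleton_eq_map]
    simp only [List.nil_append]
    rw [pv_powsum_eq_horner, pv_powsum_eq_horner, List.foldl_map, List.foldl_map]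
    rw [pvScan_eq, Nat.sub_zero]
  · have hpar' : cs.length % 2 ≠ 0 := by
      simp only [beq_iff_eq] at hpar
      omega
    simp only [hpar, Bool.false_eq_true, if_false]
    rw [if_pos hpar']
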